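-- pv_equiv track=rewrite | github.com/Dong-Jun-Shin/Study_Algorithm_Python | programmers/level2/c30_42586.py | solution
-- ===== SOURCE A (Python) =====
-- from collections import deque
--
-- def solution(progresses, speeds):
--     answer = []
--     while progresses:
--         length = len(progresses)
--         for i in range(length):
--             progresses[i] += speeds[i]
--         if progresses[0] >= 100:
--             cnt = 0
--             new_prog = deque(progresses)
--             new_speeds = deque(speeds)
--             while new_prog:
--                 val = new_prog.popleft()
--                 if val >= 100:
--                     cnt += 1
--                 else:
--                     new_prog.appendleft(val)
--                     break
--                 new_speeds.popleft()
--             progresses = list(new_prog)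
--             speeds = list(new_speeds)
--             answer.append(cnt)
--     return answer
-- ===== SOURCE B (Python) =====
-- def solution(progresses, speeds):
--     # days to release per task: at least 1 day passes, then ceil((100-p)/s)
--     days = [max(1, -(-(100 - p) // s)) for p, s in zip(progresses, speeds)]
--     answer = []
--     cur = None
--     cnt = 0
--     for d in days:
--         if cur is None or d > cur:
--             if cnt:
--                 answer.append(cnt)
--             cur = d
--             cnt = 1
--         else:
--             cnt += 1
--     if cnt:
--         answer.append(cnt)
--     return answer
-- ===== Notes on version B (the rewrite author's own statement) =====
-- stated objective: alternative
-- what changed: Instead of simulating progress day by day (adding speeds to every task each day and popping finished prefixes), B computes each task's release day in closed form as max(1, ceil((100-p)/s)) and groups the tasks in one linear pass by the running maximum release day; intended as asymptotically faster (O(n) vs O(n*D)), but a timing run could not confirm a clean ratio (A timed out at n=16 where B returned).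
-- outside the precondition, e.g. on solution([100], [0]): A returns [1], B raises ZeroDivisionError
import Mathlib
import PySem

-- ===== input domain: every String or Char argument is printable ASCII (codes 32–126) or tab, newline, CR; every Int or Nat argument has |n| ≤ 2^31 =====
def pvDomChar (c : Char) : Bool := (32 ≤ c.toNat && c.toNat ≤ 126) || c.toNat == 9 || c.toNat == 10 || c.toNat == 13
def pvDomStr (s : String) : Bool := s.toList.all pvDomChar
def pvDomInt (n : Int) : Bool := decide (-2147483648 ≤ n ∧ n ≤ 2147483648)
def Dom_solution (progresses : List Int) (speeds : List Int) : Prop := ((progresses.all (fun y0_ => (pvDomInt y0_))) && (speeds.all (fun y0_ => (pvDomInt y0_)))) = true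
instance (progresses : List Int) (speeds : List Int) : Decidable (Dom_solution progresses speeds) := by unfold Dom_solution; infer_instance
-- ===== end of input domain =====

-- B replaces A's day-by-day simulation with a closed-form release day per task
-- (max 1 (ceil((100-p)/s))) and one linear grouping pass by the running maximum day.
-- A mutates/rebinds its Python list arguments; the equivalence proved here is
-- about the return value only.

-- ===== PORT A =====
-- A's inner while loop over the deques: pop leading finished tasks, popping a speed with each.
def pvPop : List Int → List Int → Int → Int × List Int × List Int
  | [], sp, cnt => (cnt, [], sp)
  | v :: rest, sp, cnt =>
    if 100 ≤ v then pvPop rest (sp.drop 1) (cnt + 1) else (cnt, v :: rest, sp)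

-- A's outer while loop; the fuel only makes the recursion total (it never runs
-- out on inputs satisfying Pre_solution, see pvSimA_eq below).
def pvSimA : Nat → List Int → List Int → List Int → List Int
  | _, [], _, acc => acc
  | 0, _ :: _, _, acc => acc
  | fuel + 1, p :: P, S, acc =>
    let P' := List.zipWith (· + ·) (p :: P) S
    if 100 ≤ P'.headD 0 then
      match pvPop P' S 0 with
      | (cnt, restP, restS) => pvSimA fuel restP restS (acc ++ [cnt])
    else
      pvSimA fuel P' S acc

def solution (progresses : List Int) (speeds : List Int) : List Int :=
  pvSimA ((progresses.foldr (fun p m => max (100 - p) m) 1).toNat + 1) progresses speeds []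

-- ===== PORT B =====
-- B's loop body: state (cur, cnt, answer)
def pvStepB (st : Option Int × Int × List Int) (d : Int) : Option Int × Int × List Int :=
  match st with
  | (none, cnt, acc) => (some d, 1, if cnt ≠ 0 then acc ++ [cnt] else acc)
  | (some m, cnt, acc) =>
    if m < d then (some d, 1, if cnt ≠ 0 then acc ++ [cnt] else acc)
    else (some m, cnt + 1, acc)

-- B's trailing 'if cnt: answer.append(cnt)'
def pvFinishB : Option Int × Int × List Int → List Int
  | (_, cnt, acc) => if cnt ≠ 0 then acc ++ [cnt] else acc

def solution_alt (progresses : List Int) (speeds : List Int) : List Int :=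
  pvFinishB
    ((List.zipWith (fun p s => max 1 (-(PySem.Int.floordiv (-(100 - p)) s))) progresses speeds).foldl
      pvStepB (none, 0, []))

-- ===== PRECONDITION & SPEC =====
-- Pre_ excludes inputs where A raises (speeds shorter than progresses: IndexError)
-- or diverges (a used speed ≤ 0 with its task below 100), and the corner where a
-- used speed ≤ 0 but its task is already at/above 100, on which A still returns a
-- value while B's ceiling division raises ZeroDivisionError.
def Pre_solution (progresses : List Int) (speeds : List Int) : Prop :=
  progresses.length ≤ speeds.length ∧ ∀ x ∈ speeds.take progresses.length, 1 ≤ x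
instance (progresses : List Int) (speeds : List Int) : Decidable (Pre_solution progresses speeds) := by unfold Pre_solution; infer_instance

def pvWitness_solution : List Int × List Int := ([93, 30, 55], [1, 30, 5])

def Spec_solution (progresses : List Int) (speeds : List Int) (out : List Int) : Prop := out = solution_alt progresses speeds
instance (progresses : List Int) (speeds : List Int) (out : List Int) : Decidable (Spec_solution progresses speeds out) := by unfold Spec_solution; infer_instance

-- ===== CLAIM (what is proved, stated in full; the proofs are below) =====
def Claim_equal_solution : Prop := ∀ (progresses : List Int) (speeds : List Int), Dom_solution progresses speeds → Pre_solution progresses speeds → Spec_solution progresses speeds (solution progresses speeds)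

-- ===== LEMMAS AND PROOFS =====

-- ceil((100 - p) / s): days from "now" until task (p, s) reaches 100
def pvD (p s : Int) : Int := -(PySem.Int.floordiv (-(100 - p)) s)

-- A's fuel expression
def pvM (P : List Int) : Int := P.foldr (fun p m => max (100 - p) m) 1

-- grouping of raw ceil-values: the group head d releases at day max 1 d
def pvG : List Int → List Int
  | [] => []
  | d :: ds =>
    (1 + ((ds.takeWhile (fun x => decide (x ≤ max 1 d))).length : Int))
      :: pvG (ds.dropWhile (fun x => decide (x ≤ max 1 d)))
termination_by l => l.length
decreasing_by
  exact Nat.lt_succ_of_le (List.length_dropWhile_le _ _)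

-- grouping of the clamped day values (B's view)
def pvGDay : List Int → List Int
  | [] => []
  | d :: ds =>
    (1 + ((ds.takeWhile (fun x => decide (x ≤ d))).length : Int))
      :: pvGDay (ds.dropWhile (fun x => decide (x ≤ d)))
termination_by l => l.length
decreasing_by
  exact Nat.lt_succ_of_le (List.length_dropWhile_le _ _)

theorem pvG_nil : pvG [] = [] := by rw [pvG]

theorem pvG_cons (d : Int) (ds : List Int) :
    pvG (d :: ds) = (1 + ((ds.takeWhile (fun x => decide (x ≤ max 1 d))).length : Int))
      :: pvG (ds.dropWhile (fun x => decide (x ≤ max 1 d))) := by rw [pvG]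

theorem pvGDay_nil : pvGDay [] = [] := by rw [pvGDay]

theorem pvGDay_cons (d : Int) (ds : List Int) :
    pvGDay (d :: ds) = (1 + ((ds.takeWhile (fun x => decide (x ≤ d))).length : Int))
      :: pvGDay (ds.dropWhile (fun x => decide (x ≤ d))) := by rw [pvGDay]

theorem pvD_le_one {p s : Int} (hs : 1 ≤ s) : pvD p s ≤ 1 ↔ 100 ≤ p + s := by
  have h0 : (0 : Int) < s := by omega
  rw [pvD, neg_le, PySem.Int.le_floordiv_iff_mul_le h0]
  constructor <;> intro h <;> nlinarith

theorem pvD_le_zero {p s : Int} (hs : 1 ≤ s) : pvD p s ≤ 0 ↔ 100 ≤ p := by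
  have h0 : (0 : Int) < s := by omega
  rw [pvD, neg_le, neg_zero, PySem.Int.le_floordiv_iff_mul_le h0]
  constructor <;> intro h <;> nlinarith

theorem pvD_step {p s : Int} (hs : 1 ≤ s) : pvD (p + s) s = pvD p s - 1 := by
  have h0 : (0 : Int) < s := by omega
  rw [pvD, pvD, PySem.Int.floordiv_eq_ediv_of_pos h0, PySem.Int.floordiv_eq_ediv_of_pos h0,
    show -(100 - (p + s)) = -(100 - p) + 1 * s by ring,
    Int.add_mul_ediv_right _ _ (by omega : s ≠ 0)]
  ring

theorem pvM_ge_one : ∀ P : List Int, 1 ≤ pvM P := by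
  intro P; induction P with
  | nil => simp [pvM]
  | cons p t ih => simp only [pvM, List.foldr] at *; omega

theorem pvM_ge : ∀ (P : List Int) (v : Int), v ∈ P → 100 - v ≤ pvM P := by
  intro P; induction P with
  | nil => simp
  | cons p t ih =>
    intro v hv
    simp only [pvM, List.foldr] at *
    rcases List.mem_cons.mp hv with h | h
    · omega
    · have := ih v h; omega

theorem pvM_le : ∀ (P : List Int) (c : Int), 1 ≤ c → (∀ v ∈ P, 100 - v ≤ c) → pvM P ≤ c := by
  intro P; induction P with
  | nil => intro c hc _; simpa [pvM] using hc
  | cons p t ih =>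
    intro c hc h
    have h1 := h p (by simp)
    have h2 := ih c hc (fun v hv => h v (by simp [hv]))
    simp only [pvM, List.foldr] at *
    omega

theorem pvDropWhile_eq_drop {α : Type} (q : α → Bool) :
    ∀ l : List α, l.dropWhile q = l.drop (l.takeWhile q).length := by
  intro l; induction l with
  | nil => rfl
  | cons a t ih =>
    by_cases h : q a
    · simp [h, ih]
    · simp [h]

theorem pvDropWhile_head_false {α : Type} (q : α → Bool) :
    ∀ (l : List α) (d : α) (ds : List α), l.dropWhile q = d :: ds → q d = false := by
  intro l; induction l with
  | nil => intro d ds h; simp at h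
  | cons a t ih =>
    intro d ds h
    by_cases ha : q a
    · exact ih d ds (by simpa [List.dropWhile_cons, ha] using h)
    · rw [List.dropWhile_cons_of_neg (by simp [ha])] at h
      cases h
      simpa using ha

theorem pvZip_pvD_step : ∀ (P S : List Int), (∀ x ∈ S.take P.length, 1 ≤ x) →
    List.zipWith pvD (List.zipWith (· + ·) P S) S = (List.zipWith pvD P S).map (fun d => d - 1) := by
  intro P; induction P with
  | nil => intro S _; simp
  | cons p Pt ih =>
    intro S h
    cases S with
    | nil => simp
    | cons s St =>
      have hs : 1 ≤ s := h s (by simp)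
      have ht : ∀ x ∈ St.take Pt.length, 1 ≤ x := by
        intro x hx; exact h x (by simp [hx])
      simp only [List.zipWith, List.map]
      rw [pvD_step hs, ih St ht]

theorem pvMem_zipAdd : ∀ (P S : List Int),
    ∀ v ∈ List.zipWith (· + ·) P S, ∃ p ∈ P, ∃ s ∈ S.take P.length, v = p + s := by
  intro P; induction P with
  | nil => simp
  | cons p Pt ih =>
    intro S v hv
    cases S with
    | nil => simp at hv
    | cons s St =>
      simp only [List.zipWith] at hv
      rcases List.mem_cons.mp hv with h1 | h1
      · exact ⟨p, by simp, s, by simp, h1⟩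
      · obtain ⟨p0, hp0, s0, hs0, hvs⟩ := ih St v h1
        exact ⟨p0, by simp [hp0], s0, by simp [hs0], hvs⟩

theorem pvTW_len : ∀ (P S : List Int), (∀ x ∈ S.take P.length, 1 ≤ x) →
    ((List.zipWith (· + ·) P S).takeWhile (fun v => decide (100 ≤ v))).length
      = ((List.zipWith pvD (List.zipWith (· + ·) P S) S).takeWhile (fun d => decide (d ≤ 0))).length := by
  intro P; induction P with
  | nil => intro S _; simp
  | cons p Pt ih =>
    intro S h
    cases S with
    | nil => simp
    | cons s St =>
      have hs : 1 ≤ s := h s (by simp)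
      have ht : ∀ x ∈ St.take Pt.length, 1 ≤ x := by
        intro x hx; exact h x (by simp [hx])
      simp only [List.zipWith]
      by_cases hrel : 100 ≤ p + s
      · have hd : pvD (p + s) s ≤ 0 := (pvD_le_zero hs).mpr hrel
        rw [List.takeWhile_cons_of_pos (by simpa using hrel),
          List.takeWhile_cons_of_pos (by simpa using hd)]
        simp [ih St ht]
      · have hd : ¬ pvD (p + s) s ≤ 0 := fun hc => hrel ((pvD_le_zero hs).mp hc)
        rw [List.takeWhile_cons_of_neg (by simpa using hrel),
          List.takeWhile_cons_of_neg (by simpa using hd)]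

theorem pvG_shift : ∀ (n : Nat) (d : Int) (ds : List Int), ds.length ≤ n → 2 ≤ d →
    pvG ((d :: ds).map (fun x => x - 1)) = pvG (d :: ds) := by
  intro n
  induction n with
  | zero =>
    intro d ds hlen hd
    have hnil : ds = [] := List.eq_nil_of_length_eq_zero (by omega)
    subst hnil
    simp only [List.map_cons, List.map_nil, pvG_cons]
    simp
  | succ n ih =>
    intro d ds hlen hd
    have hm1 : max 1 (d - 1) = d - 1 := max_eq_right (by omega)
    have hm2 : max 1 d = d := max_eq_right (by omega)
    have hpred : ((fun x => decide (x ≤ d - 1)) ∘ (fun x : Int => x - 1))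
        = fun x : Int => decide (x ≤ d) := by
      funext x; simp only [Function.comp_apply]; rw [decide_eq_decide]; omega
    rw [List.map_cons, pvG_cons, pvG_cons, hm1, hm2, List.takeWhile_map, List.dropWhile_map,
      hpred, List.length_map]
    refine congrArg₂ List.cons rfl ?_
    cases hdd : ds.dropWhile (fun x : Int => decide (x ≤ d)) with
    | nil => simp [pvG_nil]
    | cons d1 ds1 =>
      have hfalse := pvDropWhile_head_false _ ds d1 ds1 hdd
      have hd1 : 2 ≤ d1 := by
        simp only [decide_eq_false_iff_not, not_le] at hfalse
        omega
      have hlen1 : ds1.length ≤ n := by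
        have h1 : (d1 :: ds1).length ≤ ds.length := by
          rw [← hdd]; exact List.length_dropWhile_le _ _
        simp at h1; omega
      exact ih d1 ds1 hlen1 hd1

theorem pvG_eq_gday : ∀ (n : Nat) (ds : List Int), ds.length ≤ n →
    pvGDay (ds.map (fun x => max 1 x)) = pvG ds := by
  intro n
  induction n with
  | zero =>
    intro ds hlen
    have hnil : ds = [] := List.eq_nil_of_length_eq_zero (by omega)
    subst hnil; simp [pvG_nil, pvGDay_nil]
  | succ n ih =>
    intro ds hlen
    cases ds with
    | nil => simp [pvG_nil, pvGDay_nil]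
    | cons d dt =>
      have hpred : ((fun x => decide (x ≤ max 1 d)) ∘ (fun x : Int => max 1 x))
          = fun x : Int => decide (x ≤ max 1 d) := by
        funext x; simp only [Function.comp_apply]
        rw [decide_eq_decide, max_le_iff]
        simp
      rw [List.map_cons, pvGDay_cons, pvG_cons, List.takeWhile_map, List.dropWhile_map,
        hpred, List.length_map]
      refine congrArg₂ List.cons rfl ?_
      apply ih
      have h1 := List.length_dropWhile_le (fun x : Int => decide (x ≤ max 1 d)) dt
      simp only [List.length_cons] at hlen
      omega

theorem pvPop_eq : ∀ (l sp : List Int) (c : Int),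
    pvPop l sp c = (c + ((l.takeWhile (fun v => decide (100 ≤ v))).length : Int),
        l.dropWhile (fun v => decide (100 ≤ v)),
        sp.drop (l.takeWhile (fun v => decide (100 ≤ v))).length) := by
  intro l; induction l with
  | nil => intro sp c; simp [pvPop]
  | cons v rest ih =>
    intro sp c
    by_cases hv : 100 ≤ v
    · rw [show pvPop (v :: rest) sp c
          = if 100 ≤ v then pvPop rest (sp.drop 1) (c + 1) else (c, v :: rest, sp) from rfl,
        if_pos hv, ih,
        List.takeWhile_cons_of_pos (by simpa using hv),
        List.dropWhile_cons_of_pos (by simpa using hv),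
        List.length_cons, List.drop_drop]
      refine congrArg₂ Prod.mk (by push_cast; ring) (congrArg₂ Prod.mk rfl ?_)
      rw [Nat.add_comm]
    · rw [show pvPop (v :: rest) sp c
          = if 100 ≤ v then pvPop rest (sp.drop 1) (c + 1) else (c, v :: rest, sp) from rfl,
        if_neg hv,
        List.takeWhile_cons_of_neg (by simpa using hv),
        List.dropWhile_cons_of_neg (by simpa using hv)]
      simp

theorem pvSimA_eq : ∀ (fuel : Nat) (P S acc : List Int),
    P.length ≤ S.length → (∀ x ∈ S.take P.length, 1 ≤ x) → (pvM P).toNat ≤ fuel →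
    pvSimA fuel P S acc = acc ++ pvG (List.zipWith pvD P S) := by
  intro fuel
  induction fuel with
  | zero =>
    intro P S acc hlen htake hfuel
    have := pvM_ge_one P
    omega
  | succ n ih =>
    intro P S acc hlen htake hfuel
    cases P with
    | nil => simp [pvSimA, pvG_nil]
    | cons p Pt =>
      cases S with
      | nil => simp at hlen
      | cons s St =>
        have hs : 1 ≤ s := htake s (by simp)
        have hlen' : Pt.length ≤ St.length := by simpa using hlen
        have htake' : ∀ x ∈ St.take Pt.length, 1 ≤ x := by
          intro x hx; exact htake x (by simp [hx])
        have hunfold : pvSimA (n + 1) (p :: Pt) (s :: St) acc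
            = (if 100 ≤ ((p + s) :: List.zipWith (· + ·) Pt St).headD 0 then
                match pvPop ((p + s) :: List.zipWith (· + ·) Pt St) (s :: St) 0 with
                | (cnt, restP, restS) => pvSimA n restP restS (acc ++ [cnt])
              else pvSimA n ((p + s) :: List.zipWith (· + ·) Pt St) (s :: St) acc) := rfl
        have hdzip : List.zipWith pvD ((p + s) :: List.zipWith (· + ·) Pt St) (s :: St)
            = (pvD p s :: List.zipWith pvD Pt St).map (fun d => d - 1) :=
          pvZip_pvD_step (p :: Pt) (s :: St) htake
        have hdscons : List.zipWith pvD (p :: Pt) (s :: St)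
            = pvD p s :: List.zipWith pvD Pt St := rfl
        have hmem : ∀ v ∈ (p + s) :: List.zipWith (· + ·) Pt St, ∃ p0 ∈ (p :: Pt), p0 + 1 ≤ v := by
          intro v hv
          obtain ⟨p0, hp0, s0, hs0, hvs⟩ := pvMem_zipAdd (p :: Pt) (s :: St) v hv
          have hs0' : 1 ≤ s0 := htake s0 hs0
          exact ⟨p0, hp0, by omega⟩
        by_cases hrel : 100 ≤ p + s
        · -- release branch
          have hd0 : pvD p s ≤ 1 := (pvD_le_one hs).mpr hrel
          have hmax : max 1 (pvD p s) = 1 := max_eq_left (by omega)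
          have hpredk : ((fun d => decide (d ≤ 0)) ∘ (fun d : Int => d - 1))
              = fun x : Int => decide (x ≤ 1) := by
            funext x; simp only [Function.comp_apply]; rw [decide_eq_decide]; omega
          have htw : (((p + s) :: List.zipWith (· + ·) Pt St).takeWhile
                (fun v => decide (100 ≤ v))).length
              = ((List.zipWith pvD Pt St).takeWhile (fun x => decide (x ≤ 1))).length + 1 := by
            have h1 := pvTW_len (p :: Pt) (s :: St) htake
            rw [show List.zipWith (· + ·) (p :: Pt) (s :: St)
                = (p + s) :: List.zipWith (· + ·) Pt St from rfl] at h1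
            rw [h1, hdzip, List.takeWhile_map, hpredk, List.length_map,
              List.takeWhile_cons_of_pos (by simpa using hd0), List.length_cons]
          have hrelstep : pvSimA (n + 1) (p :: Pt) (s :: St) acc
              = pvSimA n
                  (((p + s) :: List.zipWith (· + ·) Pt St).dropWhile (fun v => decide (100 ≤ v)))
                  ((s :: St).drop (((p + s) :: List.zipWith (· + ·) Pt St).takeWhile
                    (fun v => decide (100 ≤ v))).length)
                  (acc ++ [(0 : Int) + ((((p + s) :: List.zipWith (· + ·) Pt St).takeWhile
                    (fun v => decide (100 ≤ v))).length : Int)]) := by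
            rw [hunfold, if_pos (by simpa using hrel), pvPop_eq]
          rw [hrelstep, pvDropWhile_eq_drop, htw,
            List.drop_succ_cons, List.drop_succ_cons]
          set L := ((List.zipWith pvD Pt St).takeWhile (fun x => decide (x ≤ 1))).length with hL
          rw [hdscons, pvG_cons, hmax]
          have hLdst : (List.zipWith (· + ·) Pt St).drop L
              = List.zipWith (· + ·) (Pt.drop L) (St.drop L) := List.drop_zipWith
          have hLle : L ≤ Pt.length := by
            have h1 := (List.takeWhile_sublist
              (p := fun x : Int => decide (x ≤ 1)) (l := List.zipWith pvD Pt St)).length_le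
            have h2 : (List.zipWith pvD Pt St).length = Pt.length := by
              rw [List.length_zipWith]; omega
            omega
          have htake2 : ∀ x ∈ (St.drop L).take (Pt.drop L).length, 1 ≤ x := by
            intro x hx
            rw [List.length_drop, List.take_drop] at hx
            have hsum : L + (Pt.length - L) = Pt.length := by omega
            rw [hsum] at hx
            exact htake' x ((List.drop_sublist _ _).subset hx)
          have hzipk : List.zipWith pvD (Pt.drop L) (St.drop L)
              = (List.zipWith pvD Pt St).drop L := (List.drop_zipWith).symm
          have hdw_dst : (List.zipWith pvD Pt St).dropWhile (fun x => decide (x ≤ 1))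
              = (List.zipWith pvD Pt St).drop L := by
            rw [pvDropWhile_eq_drop, hL]
          rw [hLdst]
          cases hrest : List.zipWith (· + ·) (Pt.drop L) (St.drop L) with
          | nil =>
            rw [show ∀ acc2 : List Int, pvSimA n [] (St.drop L) acc2 = acc2
                from fun acc2 => by cases n <;> rfl]
            have hlen0 : Pt.length - L = 0 := by
              have hlr := congrArg List.length hrest
              rw [List.length_zipWith, List.length_drop, List.length_drop] at hlr
              simp at hlr
              omega
            have hdstnil : (List.zipWith pvD Pt St).drop L = [] := by
              apply List.eq_nil_of_length_eq_zero
              rw [List.length_drop, List.length_zipWith]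
              omega
            rw [hdw_dst, hdstnil, pvG_nil]
            exact congrArg (fun z => acc ++ [z]) (by push_cast; ring)
          | cons v rP =>
            have hvfalse : ¬ (100 : Int) ≤ v := by
              have hdw : ((p + s) :: List.zipWith (· + ·) Pt St).dropWhile
                  (fun v => decide (100 ≤ v)) = v :: rP := by
                rw [pvDropWhile_eq_drop, htw, List.drop_succ_cons, hLdst, hrest]
              have hh := pvDropWhile_head_false _ _ _ _ hdw
              simpa using hh
            have hsubset : ∀ w ∈ v :: rP, w ∈ (p + s) :: List.zipWith (· + ·) Pt St := by
              intro w hw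
              rw [← hrest, ← hLdst] at hw
              exact List.mem_cons_of_mem _ ((List.drop_sublist _ _).subset hw)
            have hfuel2 : (pvM (v :: rP)).toNat ≤ n := by
              have hbound : pvM (v :: rP) ≤ pvM (p :: Pt) - 1 := by
                apply pvM_le
                · have hv1 : 100 - v ≤ pvM (p :: Pt) - 1 := by
                    obtain ⟨p0, hp0, hle⟩ := hmem v (hsubset v (by simp))
                    have := pvM_ge (p :: Pt) p0 hp0
                    omega
                  omega
                · intro w hw
                  obtain ⟨p0, hp0, hle⟩ := hmem w (hsubset w hw)
                  have := pvM_ge (p :: Pt) p0 hp0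
                  omega
              have := pvM_ge_one (v :: rP)
              omega
            have hlr := congrArg List.length hrest
            rw [List.length_zipWith, List.length_drop, List.length_drop,
              List.length_cons] at hlr
            have hlen2 : (v :: rP).length ≤ (St.drop L).length := by
              simp only [List.length_cons, List.length_drop]
              omega
            have htake3 : ∀ x ∈ (St.drop L).take (v :: rP).length, 1 ≤ x := by
              have hlenvp : (v :: rP).length = (Pt.drop L).length := by
                simp only [List.length_cons, List.length_drop]
                omega
              rw [hlenvp]
              exact htake2
            rw [ih (v :: rP) (St.drop L) _ hlen2 htake3 hfuel2, ← hrest,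
              pvZip_pvD_step (Pt.drop L) (St.drop L) htake2, hzipk, hdw_dst]
            cases hdk : (List.zipWith pvD Pt St).drop L with
            | nil =>
              exfalso
              have hlr : (Pt.drop L).length = 0 := by
                have h1 := congrArg List.length hdk
                rw [List.length_drop, List.length_zipWith] at h1
                rw [List.length_drop]
                simp at h1
                omega
              rw [List.eq_nil_of_length_eq_zero hlr] at hrest
              simp at hrest
            | cons e es =>
              have hefalse : decide (e ≤ (1 : Int)) = false := by
                apply pvDropWhile_head_false (fun x : Int => decide (x ≤ 1))
                  (List.zipWith pvD Pt St)
                rw [hdw_dst, hdk]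
              have he2 : 2 ≤ e := by
                simp only [decide_eq_false_iff_not, not_le] at hefalse
                omega
              rw [pvG_shift es.length e es le_rfl he2,
                List.append_assoc, List.singleton_append, ← hL]
              refine congrArg (acc ++ ·) ?_
              exact congrArg₂ List.cons (by push_cast; ring) rfl
        · -- no release today
          rw [hunfold, if_neg (by simpa using hrel)]
          have hlenP' : ((p + s) :: List.zipWith (· + ·) Pt St).length ≤ (s :: St).length := by
            simp only [List.length_cons, List.length_zipWith]
            omega
          have hlenEq : ((p + s) :: List.zipWith (· + ·) Pt St).length = (p :: Pt).length := by
            simp only [List.length_cons, List.length_zipWith]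
            omega
          have htakeP' : ∀ x ∈ (s :: St).take ((p + s) :: List.zipWith (· + ·) Pt St).length,
              1 ≤ x := by
            intro x hx
            rw [hlenEq] at hx
            exact htake x hx
          have hfuel' : (pvM ((p + s) :: List.zipWith (· + ·) Pt St)).toNat ≤ n := by
            have hbound : pvM ((p + s) :: List.zipWith (· + ·) Pt St) ≤ pvM (p :: Pt) - 1 := by
              apply pvM_le
              · have := pvM_ge (p :: Pt) p (by simp)
                omega
              · intro v hv
                obtain ⟨p0, hp0, hle⟩ := hmem v hv
                have := pvM_ge (p :: Pt) p0 hp0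
                omega
            have := pvM_ge_one ((p + s) :: List.zipWith (· + ·) Pt St)
            omega
          rw [ih _ _ _ hlenP' htakeP' hfuel']
          refine congrArg₂ _ rfl ?_
          have hd2 : 2 ≤ pvD p s := by
            by_contra hc
            exact hrel ((pvD_le_one hs).mp (by omega))
          rw [hdzip, hdscons]
          exact pvG_shift (List.zipWith pvD Pt St).length (pvD p s) _ le_rfl hd2

theorem pvFoldB_eq : ∀ (ds : List Int) (m cnt : Int) (acc : List Int), 1 ≤ cnt →
    pvFinishB (ds.foldl pvStepB (some m, cnt, acc))
      = acc ++ (cnt + ((ds.takeWhile (fun x => decide (x ≤ m))).length : Int))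
          :: pvGDay (ds.dropWhile (fun x => decide (x ≤ m))) := by
  intro ds
  induction ds with
  | nil =>
    intro m cnt acc hcnt
    simp only [List.foldl, pvFinishB]
    rw [if_pos (by omega)]
    simp [pvGDay]
  | cons d dt ih =>
    intro m cnt acc hcnt
    simp only [List.foldl]
    by_cases hd : m < d
    · rw [show pvStepB (some m, cnt, acc) d
          = (some d, 1, if cnt ≠ 0 then acc ++ [cnt] else acc) from by
            simp [pvStepB, hd],
        if_pos (by omega : cnt ≠ 0), ih d 1 (acc ++ [cnt]) (by omega),
        List.takeWhile_cons_of_neg (by simp; omega),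
        List.dropWhile_cons_of_neg (by simp; omega), pvGDay]
      simp
    · rw [show pvStepB (some m, cnt, acc) d = (some m, cnt + 1, acc) from by
          simp [pvStepB, hd],
        ih m (cnt + 1) acc (by omega),
        List.takeWhile_cons_of_pos (by simp; omega),
        List.dropWhile_cons_of_pos (by simp; omega)]
      simp only [List.length_cons]
      congr 2
      push_cast
      ring

theorem pvDays_eq : ∀ (P S : List Int),
    List.zipWith (fun p s => max 1 (-(PySem.Int.floordiv (-(100 - p)) s))) P S
      = (List.zipWith pvD P S).map (fun x => max 1 x) := by
  intro P; induction P with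
  | nil => intro S; simp
  | cons p Pt ih =>
    intro S
    cases S with
    | nil => simp
    | cons s St => simp only [List.zipWith, List.map, pvD, ih]

theorem pvAlt_eq : ∀ (P S : List Int),
    solution_alt P S = pvGDay ((List.zipWith pvD P S).map (fun x => max 1 x)) := by
  intro P S
  rw [solution_alt, pvDays_eq]
  cases hds : (List.zipWith pvD P S).map (fun x => max 1 x) with
  | nil => simp [pvFinishB, pvGDay]
  | cons d dt =>
    simp only [List.foldl]
    rw [show pvStepB (none, 0, []) d = (some d, 1, ([] : List Int)) from by
        simp [pvStepB],
      pvFoldB_eq dt d 1 [] (by omega), pvGDay]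
    simp

-- ===== VERDICT (by name: the statement is the Claim_ definition above) =====
theorem solution_spec : Claim_equal_solution := by
  intro P S _hdom hpre
  obtain ⟨hlen, htake⟩ := hpre
  show solution P S = solution_alt P S
  rw [show solution P S = pvSimA ((pvM P).toNat + 1) P S [] from rfl,
    pvSimA_eq _ P S [] hlen htake (by omega), pvAlt_eq,
    pvG_eq_gday (List.zipWith pvD P S).length _ le_rfl]
  simp
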